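-- pv_equiv track=rewrite | github.com/cmdrkotori/everybody-codes | 2025/06.py | dototal
-- ===== SOURCE A (Python) =====
-- def donovice(r,mentor):
--     return sum([rr==mentor for rr in r])
--
-- def dototal(men,number,dist):
--     total = men*number
--     p = 0
--     for i in range(len(total)):
--         if total[i] in 'abc':
--             r = total[max(0,i-dist):min(len(total),i+dist+1)]
--             if total[i] == 'a':
--                 p += donovice(r,'A')
--             if total[i] == 'b':
--                 p += donovice(r,'B')
--             if total[i] == 'c':
--                 p += donovice(r,'C')
--     return p
-- ===== SOURCE B (Python) =====
-- def prefix_counts(total, ch):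
--     out = [0]
--     acc = 0
--     for c in total:
--         acc += (c == ch)
--         out.append(acc)
--     return out
--
-- def dototal(men, number, dist):
--     total = men * number
--     n = len(total)
--     pa = prefix_counts(total, 'A')
--     pb = prefix_counts(total, 'B')
--     pc = prefix_counts(total, 'C')
--     p = 0
--     for i, ch in enumerate(total):
--         if ch in 'abc':
--             lo = max(0, i - dist)
--             hi = min(n, i + dist + 1)
--             if lo < hi:
--                 pref = pa if ch == 'a' else pb if ch == 'b' else pc
--                 p += pref[hi] - pref[lo]
--     return p
-- ===== Notes on version B (the rewrite author's own statement) =====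
-- stated objective: alternative
-- what changed: B precomputes three prefix-count arrays for 'A','B','C' over the repeated string and answers each lowercase position's window by one subtraction, replacing A's per-position slice-and-scan.
-- intended difference: On inputs with dist < 0 where some lowercase position i has i+dist+1 < 0 and the wrapped-around Python slice total[i-dist : i+dist+1] still contains the matching uppercase letter, A returns that accidental positive count from a window near the string's end, while B returns 0 (the window of a negative distance is empty), which is the intended value. — e.g. on dototal("aA", 3, -2): A returns 1, B returns 0
import Mathlib
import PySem

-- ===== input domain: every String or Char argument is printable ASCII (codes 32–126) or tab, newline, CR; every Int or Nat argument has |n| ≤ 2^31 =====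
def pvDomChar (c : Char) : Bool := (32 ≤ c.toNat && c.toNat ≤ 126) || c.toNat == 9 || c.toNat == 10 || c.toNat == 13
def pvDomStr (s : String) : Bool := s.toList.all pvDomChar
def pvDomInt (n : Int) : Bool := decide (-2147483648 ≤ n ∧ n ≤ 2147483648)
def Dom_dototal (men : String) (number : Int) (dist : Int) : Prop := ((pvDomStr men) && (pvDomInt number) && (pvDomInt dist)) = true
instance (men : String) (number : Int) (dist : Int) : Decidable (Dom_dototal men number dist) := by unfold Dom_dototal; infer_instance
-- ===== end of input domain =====

-- B replaces A's per-position window scan by three prefix-count arrays with window sums by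
-- subtraction; on negative dist, where A's negative slice stop wraps to the string's end,
-- B returns 0 (empty window) — stated as the intended difference D_ below.


-- ===== PORT A =====
def donovice (r : List Char) (mentor : Char) : Int :=
  (r.map (fun rr => rr == mentor)).foldl (fun acc b => acc + (if b then (1 : Int) else 0)) 0

def dototal (men : String) (number : Int) (dist : Int) : Int :=
  let total := PySem.List.pyRepeat men.toList number
  (PySem.List.pyRange 0 (PySem.List.len total) 1).foldl (fun p i =>
    if PySem.List.pyGetD total i ' ' ∈ ['a', 'b', 'c'] then
      let r := PySem.List.slice total (some (max 0 (i - dist)))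
                 (some (min (PySem.List.len total) (i + dist + 1)))
      let p1 := if PySem.List.pyGetD total i ' ' = 'a' then p + donovice r 'A' else p
      let p2 := if PySem.List.pyGetD total i ' ' = 'b' then p1 + donovice r 'B' else p1
      if PySem.List.pyGetD total i ' ' = 'c' then p2 + donovice r 'C' else p2
    else p) 0

-- ===== PORT B =====
def prefixCounts (total : List Char) (ch : Char) : List Int :=
  (total.foldl (fun (st : Int × List Int) c =>
    let acc := st.1 + (if c = ch then 1 else 0)
    (acc, acc :: st.2)) (0, [0])).2.reverse

def dototal_alt (men : String) (number : Int) (dist : Int) : Int :=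
  let total := PySem.List.pyRepeat men.toList number
  let n : Int := (total.length : Int)
  let pa := prefixCounts total 'A'
  let pb := prefixCounts total 'B'
  let pc := prefixCounts total 'C'
  total.zipIdx.foldl (fun p ci =>
    if ci.1 = 'a' ∨ ci.1 = 'b' ∨ ci.1 = 'c' then
      let lo := max 0 ((ci.2 : Int) - dist)
      let hi := min n ((ci.2 : Int) + dist + 1)
      if lo < hi then
        let pref := if ci.1 = 'a' then pa else if ci.1 = 'b' then pb else pc
        p + (PySem.List.pyGetD pref hi 0 - PySem.List.pyGetD pref lo 0)
      else p
    else p) 0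

-- ===== PRECONDITION & SPEC =====
-- On inputs with dist < 0 where some lowercase 'a'/'b'/'c' position i of total = men*number has
-- i+dist+1 < 0 and the wrapped-around Python slice total[i-dist : i+dist+1] still contains the
-- matching uppercase letter, A returns that accidental positive count from a window near the
-- string's end, while B returns 0 (the window of a negative distance is empty), which is intended.
def D_dototal (men : String) (number : Int) (dist : Int) : Prop :=
  let T := PySem.List.pyRepeat men.toList number
  ∃ i < T.length, ∃ j < T.length,
    (i : Int) + dist < -1 ∧ (i : Int) - dist ≤ j ∧ (j : Int) - dist ≤ (T.length : Int) + i ∧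
    (T.getD i ' ', T.getD j ' ') ∈ [('a', 'A'), ('b', 'B'), ('c', 'C')]

-- decision support for the instance below: D_dototal is decided by a scan of men alone,
-- using the periodicity of men*number (never used by the claims; only by the instance).
def DTW (T : List Char) (dist : Int) : Prop :=
  dist < 0 ∧
  ∃ i < min T.length (-dist - 1).toNat, ∃ j < T.length,
    (i : Int) - dist ≤ (j : Int) ∧ (j : Int) < (T.length : Int) + i + dist + 1 ∧
    ∃ pr ∈ [('a', 'A'), ('b', 'B'), ('c', 'C')], T.getD i ' ' = pr.1 ∧ T.getD j ' ' = pr.2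

def DTA (men : String) (number : Int) (dist : Int) : Bool :=
  let M := men.toList
  let m : Int := (M.length : Int)
  let n : Int := m * max number 0
  decide (-2 * dist ≤ n) &&
  M.zipIdx.any (fun sc =>
    decide ((sc.2 : Int) < min n (-dist - 1)) &&
    [('a', 'A'), ('b', 'B'), ('c', 'C')].any (fun pr =>
      sc.1 == pr.1 &&
      M.zipIdx.any (fun rc =>
        rc.1 == pr.2 &&
        decide ((((rc.2 : Int) - ((sc.2 : Int) - dist)) % m) < n + 2 * dist + 1))))

theorem len_pyRepeat (M : List Char) (num : Int) :
    ((PySem.List.pyRepeat M num).length : Int) = (M.length : Int) * max num 0 := by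
  unfold PySem.List.pyRepeat
  rw [List.length_flatten, List.map_replicate, List.sum_replicate, smul_eq_mul]
  push_cast
  rw [Int.toNat_eq_max]
  ring

theorem getD_flatten_replicate (M : List Char) (k j : Nat) (hj : j < M.length * k) (d : Char) :
    (List.flatten (List.replicate k M)).getD j d = M.getD (j % M.length) d := by
  induction k generalizing j with
  | zero => simp at hj
  | succ k ih =>
    have hmul : M.length * (k + 1) = M.length + M.length * k := by ring
    have hlen : (List.flatten (List.replicate k M)).length = M.length * k := by
      simp [List.length_flatten, List.map_replicate, List.sum_replicate, smul_eq_mul,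
        Nat.mul_comm]
    rw [List.replicate_succ, List.flatten_cons]
    by_cases hjm : j < M.length
    · rw [List.getD_eq_getElem _ _ (by rw [List.length_append, hlen]; omega),
          List.getElem_append_left hjm, Nat.mod_eq_of_lt hjm,
          List.getD_eq_getElem _ _ hjm]
    · rw [List.getD_eq_getElem _ _ (by rw [List.length_append, hlen]; omega)]
      rw [List.getElem_append_right (by omega)]
      rw [← List.getD_eq_getElem _ d (by rw [hlen]; omega)]
      rw [ih (j - M.length) (by omega)]
      have hmod : (j - M.length) % M.length = j % M.length := by
        conv_rhs => rw [show j = (j - M.length) + M.length by omega]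
        rw [Nat.add_mod_right]
      rw [hmod]

theorem getD_pyRepeat (M : List Char) (num : Int) (j : Nat)
    (hj : j < (PySem.List.pyRepeat M num).length) (d : Char) :
    (PySem.List.pyRepeat M num).getD j d = M.getD (j % M.length) d := by
  unfold PySem.List.pyRepeat at *
  apply getD_flatten_replicate
  have : (List.flatten (List.replicate num.toNat M)).length = M.length * num.toNat := by
    simp [List.length_flatten, List.map_replicate, List.sum_replicate, smul_eq_mul,
      Nat.mul_comm]
  omega

theorem DTA_exists_iff (M : List Char) (number dist : Int) (T : List Char)
    (hlen : (T.length : Int) = (M.length : Int) * max number 0)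
    (hget : ∀ j, j < T.length → T.getD j ' ' = M.getD (j % M.length) ' ') :
    ((-2 * dist ≤ (M.length : Int) * max number 0) ∧
      ∃ sc ∈ M.zipIdx, ((sc.2 : Int) < min ((M.length : Int) * max number 0) (-dist - 1)) ∧
        ∃ pr ∈ [('a', 'A'), ('b', 'B'), ('c', 'C')], sc.1 = pr.1 ∧
          ∃ rc ∈ M.zipIdx, rc.1 = pr.2 ∧
            (((rc.2 : Int) - ((sc.2 : Int) - dist)) % (M.length : Int))
              < (M.length : Int) * max number 0 + 2 * dist + 1) ↔
    (∃ i < min T.length (-dist - 1).toNat, ∃ j < T.length,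
      (i : Int) - dist ≤ (j : Int) ∧ (j : Int) < (T.length : Int) + i + dist + 1 ∧
      ∃ pr ∈ [('a', 'A'), ('b', 'B'), ('c', 'C')], T.getD i ' ' = pr.1 ∧ T.getD j ' ' = pr.2) := by
  rw [← hlen]
  constructor
  · rintro ⟨hg, ⟨cs, s⟩, hsmem, hslt, pr, hpr, hcs, ⟨cr, r⟩, hrmem, hcr, hmod⟩
    rw [List.mk_mem_zipIdx_iff_getElem?] at hsmem hrmem
    have hsm : s < M.length := (List.getElem?_eq_some_iff.mp hsmem).1
    have hrm : r < M.length := (List.getElem?_eq_some_iff.mp hrmem).1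
    rw [List.getElem?_eq_getElem hsm] at hsmem
    rw [List.getElem?_eq_getElem hrm] at hrmem
    replace hsmem : M[s]'hsm = cs := Option.some.inj hsmem
    replace hrmem : M[r]'hrm = cr := Option.some.inj hrmem
    have hm0 : 0 < M.length := by omega
    have hm : (0 : Int) < (M.length : Int) := by exact_mod_cast hm0
    simp only at hslt hmod hcs hcr
    have hem0 : 0 ≤ ((r : Int) - ((s : Int) - dist)) % (M.length : Int) :=
      Int.emod_nonneg _ (by omega)
    have hemm : ((r : Int) - ((s : Int) - dist)) % (M.length : Int) < (M.length : Int) :=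
      Int.emod_lt_of_pos _ hm
    set jI : Int := ((s : Int) - dist) + ((r : Int) - ((s : Int) - dist)) % (M.length : Int)
      with hjI
    have hd : dist < 0 := by omega
    have hj0 : 0 ≤ jI := by omega
    have hjlt : jI < (T.length : Int) := by omega
    have hjmod : jI % (M.length : Int) = (r : Int) := by
      rw [hjI, Int.add_emod, Int.emod_emod_of_dvd _ dvd_rfl, ← Int.add_emod]
      simp only [add_sub_cancel]
      exact Int.emod_eq_of_lt (by omega) (by omega)
    refine ⟨s, by omega, jI.toNat, by omega, by omega, by omega, pr, hpr, ?_, ?_⟩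
    · rw [hget s (by omega), Nat.mod_eq_of_lt hsm, List.getD_eq_getElem _ _ hsm]
      exact hsmem.trans hcs
    · rw [hget jI.toNat (by omega)]
      have hmr : jI.toNat % M.length = r := by
        have h1 : ((jI.toNat % M.length : Nat) : Int) = jI % (M.length : Int) := by
          push_cast
          rw [Int.toNat_of_nonneg hj0]
        omega
      rw [hmr, List.getD_eq_getElem _ _ hrm]
      exact hrmem.trans hcr
  · rintro ⟨i, him, j, hjn, h1, h2, pr, hpr, hgi, hgj⟩
    have him2 : i < (-dist - 1).toNat := lt_of_lt_of_le him (Nat.min_le_right _ _)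
    have him1 : i < T.length := lt_of_lt_of_le him (Nat.min_le_left _ _)
    have htn : (((-dist - 1).toNat : Nat) : Int) = max (-dist - 1) 0 := Int.toNat_eq_max _
    have hid : (i : Int) < -dist - 1 := by
      have hc : ((i : Nat) : Int) < (((-dist - 1).toNat : Nat) : Int) := by exact_mod_cast him2
      omega
    have hdneg : dist < 0 := by omega
    have hTpos : 0 < T.length := by omega
    have hm0 : 0 < M.length := by
      by_contra h
      have hz : M.length = 0 := by omega
      rw [hz] at hlen
      simp only [Nat.cast_zero, zero_mul] at hlen
      omega
    have hmI : (0 : Int) < (M.length : Int) := by exact_mod_cast hm0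
    have hsm : i % M.length < M.length := Nat.mod_lt _ hm0
    have hrm : j % M.length < M.length := Nat.mod_lt _ hm0
    have hsi : i % M.length ≤ i := Nat.mod_le _ _
    have hgi' : M.getD (i % M.length) ' ' = pr.1 := by rw [← hgi, hget i (by omega)]
    have hgj' : M.getD (j % M.length) ' ' = pr.2 := by rw [← hgj, hget j (by omega)]
    have hg : -2 * dist ≤ (T.length : Int) := by linarith
    refine ⟨hg, (M[i % M.length]'hsm, i % M.length),
      List.mk_mem_zipIdx_iff_getElem?.mpr (List.getElem?_eq_getElem hsm), ?_, pr, hpr, ?_,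
      (M[j % M.length]'hrm, j % M.length),
      List.mk_mem_zipIdx_iff_getElem?.mpr (List.getElem?_eq_getElem hrm), ?_, ?_⟩
    · simp only
      have : ((i % M.length : Nat) : Int) ≤ (i : Int) := by exact_mod_cast hsi
      omega
    · simp only
      rw [← List.getD_eq_getElem _ ' ' hsm]
      exact hgi'
    · simp only
      rw [← List.getD_eq_getElem _ ' ' hrm]
      exact hgj'
    · simp only
      have hcast_s : ((i % M.length : Nat) : Int) = (i : Int) % (M.length : Int) := by
        push_cast; ring
      have hcast_r : ((j % M.length : Nat) : Int) = (j : Int) % (M.length : Int) := by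
        push_cast; ring
      have key : (((j % M.length : Nat) : Int) - (((i % M.length : Nat) : Int) - dist))
            % (M.length : Int)
          = ((j : Int) - ((i : Int) - dist)) % (M.length : Int) := by
        rw [hcast_s, hcast_r]
        conv_rhs => rw [show (j : Int) - ((i : Int) - dist)
          = ((j : Int) - (i : Int)) + dist by ring]
        conv_lhs => rw [show (j : Int) % (M.length : Int)
            - ((i : Int) % (M.length : Int) - dist)
          = ((j : Int) % (M.length : Int) - (i : Int) % (M.length : Int)) + dist by ring]
        rw [Int.add_emod, Int.sub_emod, Int.emod_emod_of_dvd _ dvd_rfl,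
          Int.emod_emod_of_dvd _ dvd_rfl, ← Int.sub_emod, ← Int.add_emod]
      rw [key]
      have hx0 : 0 ≤ (j : Int) - ((i : Int) - dist) := by omega
      have hle : ((j : Int) - ((i : Int) - dist)) % (M.length : Int)
          ≤ (j : Int) - ((i : Int) - dist) := by
        have hdiv : 0 ≤ ((j : Int) - ((i : Int) - dist)) / (M.length : Int) :=
          Int.ediv_nonneg hx0 (by omega)
        have hmd := Int.emod_add_mul_ediv ((j : Int) - ((i : Int) - dist)) (M.length : Int)
        nlinarith
      omega

theorem DTA_iff (men : String) (number : Int) (dist : Int) :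
    (dist < 0 ∧ DTA men number dist = true) ↔
      DTW (PySem.List.pyRepeat men.toList number) dist := by
  unfold DTW DTA
  apply and_congr_right
  intro _
  simp only [Bool.and_eq_true, List.any_eq_true, decide_eq_true_eq, beq_iff_eq]
  exact DTA_exists_iff men.toList number dist _ (len_pyRepeat men.toList number)
    (fun j hj => getD_pyRepeat men.toList number j hj ' ')

theorem DTW_iff_D (men : String) (number : Int) (dist : Int) :
    DTW (PySem.List.pyRepeat men.toList number) dist ↔ D_dototal men number dist := by
  unfold DTW D_dototal
  constructor
  · rintro ⟨hd, i, hi, j, hj, h1, h2, pr, hpr, hgi, hgj⟩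
    refine ⟨i, by omega, j, hj, by omega, h1, by omega, ?_⟩
    rw [hgi, hgj]
    simpa using hpr
  · rintro ⟨i, hi, j, hj, hneg, h1, h2, hm⟩
    exact ⟨by omega, i, by omega, j, hj, h1, by omega,
      ((PySem.List.pyRepeat men.toList number).getD i ' ',
       (PySem.List.pyRepeat men.toList number).getD j ' '), hm, rfl, rfl⟩

instance (men : String) (number : Int) (dist : Int) : Decidable (D_dototal men number dist) :=
  decidable_of_iff _ ((DTA_iff men number dist).trans (DTW_iff_D men number dist))

def Spec_dototal (men : String) (number : Int) (dist : Int) (out : Int) : Prop :=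
  ¬ D_dototal men number dist → out = dototal_alt men number dist
instance (men : String) (number : Int) (dist : Int) (out : Int) : Decidable (Spec_dototal men number dist out) := by
  unfold Spec_dototal; infer_instance

def pvDiffWitness_dototal : String × Int × Int := ("aA", 3, -2)
def pvDiffWitnessOut_dototal : Int × Int := (1, 0)

-- ===== CLAIM (what is proved, stated in full; the proofs are below) =====
def Claim_unchanged_dototal : Prop := ∀ (men : String) (number : Int) (dist : Int), Dom_dototal men number dist → Spec_dototal men number dist (dototal men number dist)
def Claim_changed_dototal : Prop := Dom_dototal (pvDiffWitness_dototal.1) (pvDiffWitness_dototal.2.1) (pvDiffWitness_dototal.2.2) ∧ D_dototal (pvDiffWitness_dototal.1) (pvDiffWitness_dototal.2.1) (pvDiffWitness_dototal.2.2) ∧ dototal (pvDiffWitness_dototal.1) (pvDiffWitness_dototal.2.1) (pvDiffWitness_dototal.2.2) = pvDiffWitnessOut_dototal.1 ∧ dototal_alt (pvDiffWitness_dototal.1) (pvDiffWitness_dototal.2.1) (pvDiffWitness_dototal.2.2) = pvDiffWitnessOut_dototal.2 ∧ pvDiffWitnessOut_dototal.1 ≠ pvDiffWitnessOut_dototal.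2
def Claim_exact_dototal : Prop := ∀ (men : String) (number : Int) (dist : Int), Dom_dototal men number dist → D_dototal men number dist → dototal men number dist ≠ dototal_alt men number dist

-- ===== LEMMAS AND PROOFS =====

-- the inner condition of D_dototal, generic in the repeated string
def DT (T : List Char) (dist : Int) : Prop :=
  ∃ i < T.length, ∃ j < T.length,
    (i : Int) + dist < -1 ∧ (i : Int) - dist ≤ (j : Int) ∧
    (j : Int) - dist ≤ (T.length : Int) + i ∧
    (T.getD i ' ', T.getD j ' ') ∈ [('a', 'A'), ('b', 'B'), ('c', 'C')]

theorem D_eq_DT (men : String) (number : Int) (dist : Int) :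
    D_dototal men number dist = DT (PySem.List.pyRepeat men.toList number) dist := rfl

-- per-position contribution of A's loop body
def winA (T : List Char) (dist : Int) (C : Char) (i : Nat) : Int :=
  ((PySem.List.slice T (some (max 0 ((i : Int) - dist)))
      (some (min (T.length : Int) ((i : Int) + dist + 1)))).count C : Int)

def cA (T : List Char) (dist : Int) (i : Nat) : Int :=
  if T.getD i ' ' = 'a' then winA T dist 'A' i
  else if T.getD i ' ' = 'b' then winA T dist 'B' i
  else if T.getD i ' ' = 'c' then winA T dist 'C' i
  else 0

-- per-position contribution of B's loop body, with the prefix lookups written as take-counts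
def cB (T : List Char) (dist : Int) (i : Nat) : Int :=
  let c := T.getD i ' '
  let C := if c = 'a' then 'A' else if c = 'b' then 'B' else 'C'
  if c = 'a' ∨ c = 'b' ∨ c = 'c' then
    let lo := max 0 ((i : Int) - dist)
    let hi := min (T.length : Int) ((i : Int) + dist + 1)
    if lo < hi then ((T.take hi.toNat).count C : Int) - ((T.take lo.toNat).count C : Int) else 0
  else 0

def prefAux (ch : Char) : List Char → Int → List Int
  | [], _ => []
  | c :: rest, acc =>
      let acc' := acc + (if c = ch then 1 else 0)
      acc' :: prefAux ch rest acc'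

theorem foldl_prefAux (ch : Char) (T : List Char) (acc : Int) (l : List Int) :
    (T.foldl (fun (st : Int × List Int) c =>
        let a := st.1 + (if c = ch then 1 else 0)
        (a, a :: st.2)) (acc, l)).2
      = (prefAux ch T acc).reverse ++ l := by
  induction T generalizing acc l with
  | nil => simp [prefAux]
  | cons c rest ih =>
    simp only [List.foldl_cons, prefAux, ih, List.reverse_cons, List.append_assoc,
      List.cons_append, List.nil_append]

theorem prefixCounts_eq (total : List Char) (ch : Char) :
    prefixCounts total ch = 0 :: prefAux ch total 0 := by
  unfold prefixCounts
  rw [foldl_prefAux]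
  simp

theorem prefAux_getD (ch : Char) (T : List Char) (acc : Int) (k : Nat) (hk : k < T.length) :
    (prefAux ch T acc).getD k 0 = acc + ((T.take (k + 1)).count ch : Int) := by
  induction T generalizing acc k with
  | nil => simp at hk
  | cons c rest ih =>
    cases k with
    | zero =>
      simp [prefAux, List.count_cons, List.count_nil]
    | succ k =>
      simp only [prefAux, List.getD_cons_succ]
      rw [ih _ _ (by simpa using hk)]
      simp only [List.take_succ_cons, List.count_cons]
      by_cases h : c = ch <;> simp [h, beq_iff_eq] <;> push_cast <;> ring_nf

theorem prefixCounts_getD (T : List Char) (ch : Char) (k : Nat) (hk : k ≤ T.length) :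
    (prefixCounts T ch).getD k 0 = ((T.take k).count ch : Int) := by
  rw [prefixCounts_eq]
  cases k with
  | zero => simp
  | succ k => simpa using prefAux_getD ch T 0 k (by omega)

theorem donovice_eq_count (r : List Char) (m : Char) : donovice r m = (r.count m : Int) := by
  unfold donovice
  rw [PySem.List.foldl_add, List.map_map]
  have h := PySem.List.sum_map_ite_one_zero (fun rr => rr == m) r
  simp only [Function.comp_def] at h ⊢
  rw [h]
  simp [List.count]

theorem A_sum (men : String) (number : Int) (dist : Int) :
    dototal men number dist =
      ((List.range (PySem.List.pyRepeat men.toList number).length).map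
        (cA (PySem.List.pyRepeat men.toList number) dist)).sum := by
  unfold dototal
  simp only
  rw [PySem.List.pyRange_one, List.foldl_map]
  have hlen : ((PySem.List.len (PySem.List.pyRepeat men.toList number) : Int) - 0).toNat
      = (PySem.List.pyRepeat men.toList number).length := by
    simp [PySem.List.len]
  rw [hlen]
  rw [PySem.List.foldl_congr_mem _ _
      (fun p i => p + cA (PySem.List.pyRepeat men.toList number) dist i) 0 ?_]
  · rw [PySem.List.foldl_add]; simp
  · intro acc i _
    set T := PySem.List.pyRepeat men.toList number with hT
    simp only [zero_add, PySem.List.pyGetD_natCast, PySem.List.len]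
    by_cases ha : T[i]?.getD ' ' = 'a'
    · simp [cA, List.getD_eq_getElem?_getD, ha, winA, donovice_eq_count]
    · by_cases hb : T[i]?.getD ' ' = 'b'
      · simp [cA, List.getD_eq_getElem?_getD, ha, hb, winA, donovice_eq_count]
      · by_cases hc : T[i]?.getD ' ' = 'c'
        · simp [cA, List.getD_eq_getElem?_getD, ha, hb, hc, winA, donovice_eq_count]
        · simp [cA, List.getD_eq_getElem?_getD, ha, hb, hc]

theorem pref_lookup (T : List Char) (ch : Char) (x : Int) (h0 : 0 ≤ x) (hn : x ≤ (T.length : Int)) :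
    PySem.List.pyGetD (prefixCounts T ch) x 0 = ((T.take x.toNat).count ch : Int) := by
  have hx : ((x.toNat : Nat) : Int) = x := Int.toNat_of_nonneg h0
  rw [← hx, PySem.List.pyGetD_natCast]
  exact prefixCounts_getD T ch x.toNat (by omega)

theorem zipIdx_eq_map_range (T : List Char) :
    T.zipIdx = (List.range T.length).map (fun k => (T.getD k ' ', k)) := by
  apply List.ext_getElem
  · simp
  · intro i h1 h2
    have hi : i < T.length := by simpa using h1
    simp [List.getElem_zipIdx, List.getElem?_eq_getElem hi]

theorem B_sum (men : String) (number : Int) (dist : Int) :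
    dototal_alt men number dist =
      ((List.range (PySem.List.pyRepeat men.toList number).length).map
        (cB (PySem.List.pyRepeat men.toList number) dist)).sum := by
  unfold dototal_alt
  simp only
  rw [zipIdx_eq_map_range, List.foldl_map]
  rw [PySem.List.foldl_congr_mem _ _
      (fun p k => p + cB (PySem.List.pyRepeat men.toList number) dist k) 0 ?_]
  · rw [PySem.List.foldl_add]; simp
  · intro acc k hk
    have hkn : k < (PySem.List.pyRepeat men.toList number).length := List.mem_range.mp hk
    set T := PySem.List.pyRepeat men.toList number with hT
    simp only
    by_cases habc : T.getD k ' ' = 'a' ∨ T.getD k ' ' = 'b' ∨ T.getD k ' ' = 'c'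
    · by_cases hlohi : max 0 ((k : Int) - dist) < min ((T.length : Int)) ((k : Int) + dist + 1)
      · have h0lo : (0 : Int) ≤ max 0 ((k : Int) - dist) := le_max_left _ _
        have hhin : min ((T.length : Int)) ((k : Int) + dist + 1) ≤ (T.length : Int) := min_le_left _ _
        have h0hi : (0 : Int) ≤ min ((T.length : Int)) ((k : Int) + dist + 1) := le_of_lt (lt_of_le_of_lt h0lo hlohi)
        have hlon : max 0 ((k : Int) - dist) ≤ (T.length : Int) := le_of_lt (lt_of_lt_of_le hlohi hhin)
        rcases habc with ha | hb | hc
        · simp only [cB, ha, if_pos rfl, if_true, or_true, true_or,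
            pref_lookup T 'A' _ h0lo hlon, pref_lookup T 'A' _ h0hi hhin]
          simp [ha, hlohi]
        · have ha : ¬ T.getD k ' ' = 'a' := by rw [hb]; decide
          simp only [cB, hb, ha]
          simp [ha, hb, hlohi]
          rw [pref_lookup T 'B' _ h0hi hhin, pref_lookup T 'B' _ h0lo hlon]
        · have ha : ¬ T.getD k ' ' = 'a' := by rw [hc]; decide
          have hb : ¬ T.getD k ' ' = 'b' := by rw [hc]; decide
          simp only [cB, hc, ha, hb]
          simp [ha, hb, hc, hlohi]
          rw [pref_lookup T 'C' _ h0hi hhin, pref_lookup T 'C' _ h0lo hlon]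
      · simp [cB, habc, hlohi]
    · simp only [List.getD_eq_getElem?_getD] at habc
      simp [cB, List.getD_eq_getElem?_getD, habc]

theorem count_window (T : List Char) (C : Char) (a b : Nat) (hab : a ≤ b) :
    ((List.take (b - a) (List.drop a T)).count C : Int) =
      ((T.take b).count C : Int) - ((T.take a).count C : Int) := by
  have h : T.take b = T.take a ++ List.take (b - a) (List.drop a T) := by
    rw [← List.take_add]; congr 1; omega
  rw [h, List.count_append]
  push_cast; ring

theorem mem_window_iff (T : List Char) (C : Char) (a b : Nat) :
    C ∈ List.take (b - a) (List.drop a T) ↔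
      ∃ j, a ≤ j ∧ j < b ∧ ∃ _h : j < T.length, T.getD j ' ' = C := by
  constructor
  · intro h
    obtain ⟨k, hk, he⟩ := List.mem_iff_getElem.mp h
    have hlen : k < b - a ∧ a + k < T.length := by
      have := hk; simp [List.length_take, List.length_drop] at this; omega
    refine ⟨a + k, by omega, by omega, by omega, ?_⟩
    rw [List.getD_eq_getElem _ _ (by omega)]
    rw [List.getElem_take, List.getElem_drop] at he
    exact he
  · rintro ⟨j, haj, hjb, hjn, he⟩
    rw [List.mem_iff_getElem]
    refine ⟨j - a, ?_, ?_⟩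
    · simp [List.length_take, List.length_drop]; omega
    · rw [List.getElem_take, List.getElem_drop]
      rw [List.getD_eq_getElem _ _ hjn] at he
      convert he using 2; omega

theorem clamp_nonneg (n : Nat) (x : Int) (h0 : 0 ≤ x) (hn : x ≤ (n : Int)) :
    PySem.List.clampIdx n x = x.toNat := by
  unfold PySem.List.clampIdx
  rw [if_neg (by omega)]
  omega

theorem winA_pos_eq (T : List Char) (dist : Int) (hd : 0 ≤ dist) (i : Nat) (hi : i < T.length)
    (C : Char) :
    winA T dist C i =
      ((T.take (min (T.length : Int) ((i : Int) + dist + 1)).toNat).count C : Int) -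
        ((T.take (max 0 ((i : Int) - dist)).toNat).count C : Int) := by
  unfold winA PySem.List.slice
  simp only
  rw [clamp_nonneg _ _ (le_max_left _ _) (by omega),
      clamp_nonneg _ _ (by omega) (min_le_left _ _)]
  exact count_window T C _ _ (by omega)

theorem lohi_pos (T : List Char) (dist : Int) (hd : 0 ≤ dist) (i : Nat) (hi : i < T.length) :
    max 0 ((i : Int) - dist) < min ((T.length : Int)) ((i : Int) + dist + 1) := by omega

theorem lohi_neg (T : List Char) (dist : Int) (hd : dist < 0) (i : Nat) :
    ¬ max 0 ((i : Int) - dist) < min ((T.length : Int)) ((i : Int) + dist + 1) := by omega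

theorem cB_neg_zero (T : List Char) (dist : Int) (hd : dist < 0) (i : Nat) : cB T dist i = 0 := by
  unfold cB
  simp only
  rw [if_neg (lohi_neg T dist hd i)]
  split <;> rfl

theorem winA_neg_zero (T : List Char) (dist : Int) (hd : dist < 0) (i : Nat) (hi : i < T.length)
    (c C : Char) (hc : T.getD i ' ' = c)
    (hpr : (c, C) ∈ [('a', 'A'), ('b', 'B'), ('c', 'C')]) (hnD : ¬ DT T dist) :
    winA T dist C i = 0 := by
  unfold winA PySem.List.slice
  simp only
  by_cases h1 : 0 ≤ (i : Int) + dist + 1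
  · have hb : PySem.List.clampIdx T.length (min ((T.length : Int)) ((i : Int) + dist + 1))
        = (min ((T.length : Int)) ((i : Int) + dist + 1)).toNat :=
      clamp_nonneg _ _ (by omega) (min_le_left _ _)
    rw [hb]
    have ha' : (min ((T.length : Int)) ((i : Int) + dist + 1)).toNat
        ≤ PySem.List.clampIdx T.length (max 0 ((i : Int) - dist)) := by
      unfold PySem.List.clampIdx
      rw [if_neg (by omega)]
      omega
    rw [Nat.sub_eq_zero_of_le ha']
    simp
  · -- negative stop: the window wraps; ¬DT forbids any matching uppercase inside it
    by_contra hne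
    have hmem : C ∈ List.take
        (PySem.List.clampIdx T.length (min ((T.length : Int)) ((i : Int) + dist + 1)) -
          PySem.List.clampIdx T.length (max 0 ((i : Int) - dist)))
        (List.drop (PySem.List.clampIdx T.length (max 0 ((i : Int) - dist))) T) := by
      by_contra hmm
      rw [List.count_eq_zero_of_not_mem hmm] at hne
      exact hne rfl
    obtain ⟨j, haj, hjb, hjn, hgj⟩ := (mem_window_iff T C _ _).mp hmem
    apply hnD
    refine ⟨i, hi, j, hjn, by omega, ?_, ?_, ?_⟩
    · -- a ≤ j gives i - dist ≤ j
      have ha : PySem.List.clampIdx T.length (max 0 ((i : Int) - dist))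
          = min ((i : Int) - dist).toNat T.length := by
        unfold PySem.List.clampIdx
        rw [if_neg (by omega)]
        congr 1; omega
      rw [ha] at haj; omega
    · -- j < b gives j < n + i + dist + 1
      have hb : PySem.List.clampIdx T.length (min ((T.length : Int)) ((i : Int) + dist + 1))
          = ((T.length : Int) + ((i : Int) + dist + 1)).toNat := by
        unfold PySem.List.clampIdx
        rw [if_pos (by omega)]
        split <;> omega
      rw [hb] at hjb; omega
    · rw [hc, hgj]; exact hpr

theorem cA_nonneg (T : List Char) (dist : Int) (i : Nat) : 0 ≤ cA T dist i := by
  unfold cA winA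
  split_ifs <;> simp

theorem point_eq (T : List Char) (dist : Int) (hnD : ¬ DT T dist) (i : Nat) (hi : i < T.length) :
    cA T dist i = cB T dist i := by
  by_cases hd : 0 ≤ dist
  · unfold cA cB
    simp only
    by_cases ha : T.getD i ' ' = 'a'
    · rw [if_pos ha, winA_pos_eq T dist hd i hi, if_pos (Or.inl ha),
          if_pos (lohi_pos T dist hd i hi), ha, if_pos rfl]
    · by_cases hb : T.getD i ' ' = 'b'
      · rw [if_neg ha, if_pos hb, winA_pos_eq T dist hd i hi, if_pos (Or.inr (Or.inl hb)),
            if_pos (lohi_pos T dist hd i hi), hb, if_neg (by decide), if_pos rfl]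
      · by_cases hc : T.getD i ' ' = 'c'
        · rw [if_neg ha, if_neg hb, if_pos hc, winA_pos_eq T dist hd i hi,
              if_pos (Or.inr (Or.inr hc)), if_pos (lohi_pos T dist hd i hi), hc,
              if_neg (by decide), if_neg (by decide)]
        · rw [if_neg ha, if_neg hb, if_neg hc, if_neg (by rintro (h|h|h); exacts [ha h, hb h, hc h])]
  · replace hd : dist < 0 := by omega
    rw [cB_neg_zero T dist hd i]
    unfold cA
    by_cases ha : T.getD i ' ' = 'a'
    · rw [if_pos ha]; exact winA_neg_zero T dist hd i hi _ _ ha (by decide) hnD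
    · by_cases hb : T.getD i ' ' = 'b'
      · rw [if_neg ha, if_pos hb]; exact winA_neg_zero T dist hd i hi _ _ hb (by decide) hnD
      · by_cases hc : T.getD i ' ' = 'c'
        · rw [if_neg ha, if_neg hb, if_pos hc]
          exact winA_neg_zero T dist hd i hi _ _ hc (by decide) hnD
        · rw [if_neg ha, if_neg hb, if_neg hc]

theorem winA_ge_one (T : List Char) (dist : Int) (hd : dist < 0) (i j : Nat)
    (hi : i < T.length) (hneg : (i : Int) + dist + 1 < 0) (hj : j < T.length)
    (h1 : (i : Int) - dist ≤ (j : Int)) (h2 : (j : Int) < (T.length : Int) + i + dist + 1)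
    (C : Char) (hcj : T.getD j ' ' = C) :
    1 ≤ winA T dist C i := by
  unfold winA PySem.List.slice
  simp only
  have hb : PySem.List.clampIdx T.length (min ((T.length : Int)) ((i : Int) + dist + 1))
      = ((T.length : Int) + ((i : Int) + dist + 1)).toNat := by
    unfold PySem.List.clampIdx
    rw [if_pos (by omega)]
    split <;> omega
  have ha : PySem.List.clampIdx T.length (max 0 ((i : Int) - dist))
      = min ((i : Int) - dist).toNat T.length := by
    unfold PySem.List.clampIdx
    rw [if_neg (by omega)]
    congr 1; omega
  rw [ha, hb]
  have hmem : C ∈ List.take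
      (((T.length : Int) + ((i : Int) + dist + 1)).toNat - min ((i : Int) - dist).toNat T.length)
      (List.drop (min ((i : Int) - dist).toNat T.length) T) :=
    (mem_window_iff T C _ _).mpr ⟨j, by omega, by omega, hj, hcj⟩
  have := List.count_pos_iff.mpr hmem
  omega

theorem cA_ge_one (T : List Char) (dist : Int) (hd : dist < 0) (i j : Nat)
    (hi : i < T.length) (hneg : (i : Int) + dist + 1 < 0) (hj : j < T.length)
    (h1 : (i : Int) - dist ≤ (j : Int)) (h2 : (j : Int) < (T.length : Int) + i + dist + 1)
    (hm : (T.getD i ' ', T.getD j ' ') ∈ [('a', 'A'), ('b', 'B'), ('c', 'C')]) :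
    1 ≤ cA T dist i := by
  simp only [List.mem_cons, List.not_mem_nil, or_false, Prod.mk.injEq] at hm
  unfold cA
  rcases hm with ⟨hci, hcj⟩ | ⟨hci, hcj⟩ | ⟨hci, hcj⟩
  · rw [if_pos hci]; exact winA_ge_one T dist hd i j hi hneg hj h1 h2 _ hcj
  · rw [if_neg (by rw [hci]; decide), if_pos hci]
    exact winA_ge_one T dist hd i j hi hneg hj h1 h2 _ hcj
  · rw [if_neg (by rw [hci]; decide), if_neg (by rw [hci]; decide), if_pos hci]
    exact winA_ge_one T dist hd i j hi hneg hj h1 h2 _ hcj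

theorem A_ne_B_of_DT (men : String) (number : Int) (dist : Int)
    (hD : DT (PySem.List.pyRepeat men.toList number) dist) :
    dototal men number dist ≠ dototal_alt men number dist := by
  rw [A_sum, B_sum]
  set T := PySem.List.pyRepeat men.toList number with hT
  obtain ⟨i, hi, j, hj, hneg', h1, h2', hm⟩ := hD
  have hd : dist < 0 := by omega
  have hneg : (i : Int) + dist + 1 < 0 := by omega
  have h2 : (j : Int) < (T.length : Int) + i + dist + 1 := by omega
  have hB : ((List.range T.length).map (cB T dist)).sum = 0 := by
    apply List.sum_eq_zero
    intro x hx
    obtain ⟨k, _, rfl⟩ := List.mem_map.mp hx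
    exact cB_neg_zero T dist hd k
  rw [hB]
  have h1' := cA_ge_one T dist hd i j hi hneg hj h1 h2 hm
  have hge : cA T dist i ≤ ((List.range T.length).map (cA T dist)).sum := by
    apply List.single_le_sum
    · intro x hx
      obtain ⟨k, _, rfl⟩ := List.mem_map.mp hx
      exact cA_nonneg T dist k
    · exact List.mem_map.mpr ⟨i, List.mem_range.mpr hi, rfl⟩
  omega

-- ===== VERDICT (by name: the statement is the Claim_ definition above) =====
theorem dototal_spec : Claim_unchanged_dototal := by
  intro men number dist _
  unfold Spec_dototal
  intro hnD
  rw [D_eq_DT] at hnD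
  rw [A_sum, B_sum]
  exact congrArg List.sum
    (List.map_congr_left (fun i hi => point_eq _ dist hnD i (List.mem_range.mp hi)))

theorem dototal_changed : Claim_changed_dototal := by
  unfold Claim_changed_dototal; decide

theorem dototal_tight : Claim_exact_dototal := by
  intro men number dist _ hD
  rw [D_eq_DT] at hD
  exact A_ne_B_of_DT men number dist hD
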